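-- pv_equiv track=rewrite | github.com/kenny-kogi/Leet-Code-DSA | alphabetically_largest.py | largestCharacter
-- ===== SOURCE A (Python) =====
-- def largestCharacter(str):
--     upper_case = [False] * 26
--     lower_case = [False] * 26
--
--     arr = list(str)
--     for c in arr:
--         if (c.islower()):
--             lower_case[ord(c) - ord('a')] = True
--         if (c.isupper()):
--             upper_case[ord(c) - ord('A')] = True
--
--     # Iterate from right side of array
--     # to get the largest index character
--     for i in range(25,-1,-1):
--
--         # Check for the character if both its
--         # uppercase and lowercase exist or not
--         if (upper_case[i] and lower_case[i]):
--             return chr(i + ord('A')) + ""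
--     # Return -1 if no such character whose
--     # uppercase and lowercase present in
--     # string str
--     return "NO"
-- ===== SOURCE B (Python) =====
-- def largestCharacter(str):
--     # Single pass with a running maximum: whenever the current character completes an
--     # upper/lower pair with a previously seen character, update the best uppercase letter.
--     best = None
--     seen = set()
--     for c in str:
--         if c.islower() and chr(ord(c) - 32) in seen:
--             u = chr(ord(c) - 32)
--             if best is None or u > best:
--                 best = u
--         elif c.isupper() and chr(ord(c) + 32) in seen:
--             if best is None or c > best:
--                 best = c
--         seen.add(c)
--     return best if best is not None else "NO"
-- ===== Notes on version B (the rewrite author's own statement) =====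
-- stated objective: alternative
-- what changed: Replaces A's staged passes (mark two 26-entry boolean arrays indexed by ord arithmetic, then scan the alphabet descending by index) with a single pass over the string that keeps a set of characters seen so far and a running maximum, updated whenever the current character completes an upper/lower pair with an earlier one.
import Mathlib
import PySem

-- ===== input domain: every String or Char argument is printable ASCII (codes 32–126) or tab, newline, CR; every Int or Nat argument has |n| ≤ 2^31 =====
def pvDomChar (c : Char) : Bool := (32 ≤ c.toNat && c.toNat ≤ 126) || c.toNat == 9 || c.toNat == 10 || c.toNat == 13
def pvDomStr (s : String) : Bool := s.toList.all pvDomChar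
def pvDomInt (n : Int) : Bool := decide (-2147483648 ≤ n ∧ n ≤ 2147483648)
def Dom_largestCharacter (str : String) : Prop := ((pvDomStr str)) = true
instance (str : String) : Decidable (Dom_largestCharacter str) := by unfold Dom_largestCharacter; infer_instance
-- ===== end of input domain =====

-- B replaces A's staged passes (mark two 26-entry boolean arrays, then scan the alphabet
-- descending by index) with a SINGLE pass over the string keeping a running maximum:
-- whenever the current character completes an upper/lower pair with an earlier character,
-- the best uppercase letter so far is updated (simpler: no alphabet loop, no index arrays).

-- ===== PORT A =====
-- c.islower() / c.isupper() on a single character: exact on the ASCII domain (Dom), where the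
-- only cased characters are a-z / A-Z.
def pyIslowerA (c : Char) : Bool := 97 ≤ c.toNat && c.toNat ≤ 122
def pyIsupperA (c : Char) : Bool := 65 ≤ c.toNat && c.toNat ≤ 90

-- the reverse index loop 'for i in range(25,-1,-1)'; list indexing via getD is exact here since
-- both lists have length 26 and i ∈ [0,25]
def scanA (upperCase lowerCase : List Bool) : List Int → String
  | [] => "NO"
  | i :: rest =>
    if upperCase.getD i.toNat false && lowerCase.getD i.toNat false then
      String.ofList [Char.ofNat (i.toNat + 65)]
    else scanA upperCase lowerCase rest

def largestCharacter (str : String) : String :=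
  -- upper_case / lower_case arrays; the in-range list writes lower_case[ord(c)-ord('a')] = True
  -- are exact on Dom, where islower/isupper imply a-z / A-Z
  let arr := str.toList
  let st := arr.foldl (fun (st : List Bool × List Bool) c =>
    (if pyIsupperA c then st.1.set (c.toNat - 65) true else st.1,
     if pyIslowerA c then st.2.set (c.toNat - 97) true else st.2))
    (List.replicate 26 false, List.replicate 26 false)
  scanA st.1 st.2 (PySem.List.pyRange 25 (-1) (-1))

-- ===== PORT B =====
-- one iteration of B's loop: state = (best, seen); 'u > best' on the single-char strings of
-- Source B is the code-point comparison of the characters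
def stepB (st : Option Char × PySem.Set Char) (c : Char) : Option Char × PySem.Set Char :=
  if pyIslowerA c && PySem.Set.contains st.2 (Char.ofNat (c.toNat - 32)) then
    ((if st.1.elim true (fun b => b.toNat < (Char.ofNat (c.toNat - 32)).toNat)
        then some (Char.ofNat (c.toNat - 32)) else st.1),
     PySem.Set.add st.2 c)
  else if pyIsupperA c && PySem.Set.contains st.2 (Char.ofNat (c.toNat + 32)) then
    ((if st.1.elim true (fun b => b.toNat < c.toNat) then some c else st.1),
     PySem.Set.add st.2 c)
  else (st.1, PySem.Set.add st.2 c)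

def largestCharacter_alt (str : String) : String :=
  let st := str.toList.foldl stepB (none, PySem.Set.empty)
  match st.1 with
  | some u => String.ofList [u]
  | none => "NO"

-- ===== PRECONDITION & SPEC =====
def Spec_largestCharacter (str : String) (out : String) : Prop := out = largestCharacter_alt str
instance (str : String) (out : String) : Decidable (Spec_largestCharacter str out) := by unfold Spec_largestCharacter; infer_instance

-- ===== CLAIM (what is proved, stated in full; the proofs are below) =====
def Claim_equal_largestCharacter : Prop := ∀ (str : String), Dom_largestCharacter str → Spec_largestCharacter str (largestCharacter str)

-- ===== LEMMAS AND PROOFS =====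

-- the common middle ground: a descending membership scan over a set of characters
def scanMem (chars : PySem.Set Char) : List Char → String
  | [] => "NO"
  | u :: rest =>
    if PySem.Set.contains chars u && PySem.Set.contains chars (Char.ofNat (u.toNat + 32)) then
      String.ofList [u]
    else scanMem chars rest

def lettersZA : List Char :=
  ['Z','Y','X','W','V','U','T','S','R','Q','P','O','N','M','L','K','J','I','H','G','F','E','D','C','B','A']

theorem getD_set_bool (a : List Bool) (j i : Nat) (v : Bool) :
    (a.set j v).getD i false = if j = i ∧ j < a.length then v else a.getD i false := by
  simp only [List.getD, List.getElem?_set]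
  split_ifs <;> (simp_all; try omega)

theorem char_eq_of_toNat_eq (c d : Char) (h : c.toNat = d.toNat) : c = d :=
  Char.ext (UInt32.toNat_inj.mp h)

theorem toNat_ofNat_small (n : Nat) (h : n < 55296) : (Char.ofNat n).toNat = n := by
  simp [Char.ofNat, Nat.isValidChar, h]

-- one component of A's marking loop
theorem foldMark_getD (p : Char → Bool) (off : Nat) (cs : List Char) (a : List Bool) (i : Nat)
    (hi : i < a.length) :
    ((cs.foldl (fun a c => if p c then a.set (c.toNat - off) true else a) a).getD i false
      = (a.getD i false || cs.any (fun c => p c && c.toNat - off == i))) := by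
  induction cs generalizing a with
  | nil => simp
  | cons c cs ih =>
    by_cases hp : p c = true
    · simp only [List.foldl_cons, List.any_cons, hp, if_true, Bool.true_and]
      rw [ih _ (by simpa using hi), getD_set_bool]
      split_ifs with hj
      · simp [hj.1]
      · have hne : (c.toNat - off == i) = false := by
          simp only [beq_eq_false_iff_ne]; intro he; exact hj ⟨he, he ▸ hi⟩
        simp [hne]
    · simp only [List.foldl_cons, List.any_cons, hp, Bool.false_and, Bool.false_or]
      exact ih a hi

theorem flagMark_eq_contains (p : Char → Bool) (off : Nat) (cs : List Char) (u : Char)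
    (hu : p u = true)
    (hinj : ∀ c, p c = true → c.toNat - off = u.toNat - off → c = u)
    (hlt : u.toNat - off < 26) :
    ((cs.foldl (fun a c => if p c then a.set (c.toNat - off) true else a)
        (List.replicate 26 false)).getD (u.toNat - off) false
      = PySem.Set.contains (PySem.Set.ofList cs) u) := by
  rw [foldMark_getD p off cs _ _ (by simpa using hlt)]
  have hrep : (List.replicate 26 false).getD (u.toNat - off) false = false := by
    simp only [List.getD, List.getElem?_replicate]
    split <;> rfl
  rw [hrep, Bool.false_or, Bool.eq_iff_iff]
  simp only [List.any_eq_true, Bool.and_eq_true, beq_iff_eq, PySem.Set.contains_iff,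
    PySem.Set.mem_ofList]
  constructor
  · rintro ⟨c, hc, hpc, he⟩
    exact (hinj c hpc he) ▸ hc
  · intro hmem; exact ⟨u, hmem, hu, rfl⟩

-- specialisations: the upper flag at index u.toNat-65 is 'u ∈ set(str)', for an uppercase letter u
theorem flagU (cs : List Char) (u : Char) (h1 : 65 ≤ u.toNat) (h2 : u.toNat ≤ 90) :
    ((cs.foldl (fun a c => if pyIsupperA c then a.set (c.toNat - 65) true else a)
        (List.replicate 26 false)).getD (u.toNat - 65) false
      = PySem.Set.contains (PySem.Set.ofList cs) u) := by
  refine flagMark_eq_contains _ _ _ _ ?_ ?_ (by omega)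
  · simp [pyIsupperA]; omega
  · intro c hc he
    simp [pyIsupperA] at hc
    exact char_eq_of_toNat_eq c u (by omega)

theorem flagL (cs : List Char) (u : Char) (h1 : 97 ≤ u.toNat) (h2 : u.toNat ≤ 122) :
    ((cs.foldl (fun a c => if pyIslowerA c then a.set (c.toNat - 97) true else a)
        (List.replicate 26 false)).getD (u.toNat - 97) false
      = PySem.Set.contains (PySem.Set.ofList cs) u) := by
  refine flagMark_eq_contains _ _ _ _ ?_ ?_ (by omega)
  · simp [pyIslowerA]; omega
  · intro c hc he
    simp [pyIslowerA] at hc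
    exact char_eq_of_toNat_eq c u (by omega)

-- A computes the descending membership scan over set(str)
theorem A_eq_scanMem (str : String) :
    largestCharacter str = scanMem (PySem.Set.ofList str.toList) lettersZA := by
  simp only [largestCharacter]
  have hsplit : (List.foldl (fun (st : List Bool × List Bool) c =>
      (if pyIsupperA c then st.1.set (c.toNat - 65) true else st.1,
       if pyIslowerA c then st.2.set (c.toNat - 97) true else st.2))
      (List.replicate 26 false, List.replicate 26 false) str.toList)
      = (str.toList.foldl (fun (a : List Bool) c => if pyIsupperA c then a.set (c.toNat - 65) true else a)
           (List.replicate 26 false),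
         str.toList.foldl (fun (a : List Bool) c => if pyIslowerA c then a.set (c.toNat - 97) true else a)
           (List.replicate 26 false)) :=
    PySem.List.foldl_prod_mk
      (f := fun (a : List Bool) c => if pyIsupperA c then a.set (c.toNat - 65) true else a)
      (g := fun (a : List Bool) c => if pyIslowerA c then a.set (c.toNat - 97) true else a) _ _ _
  rw [hsplit]
  set chars : PySem.Set Char := PySem.Set.ofList str.toList with hchars
  set stU := str.toList.foldl (fun (a : List Bool) c => if pyIsupperA c then a.set (c.toNat - 65) true else a)
    (List.replicate 26 false) with hstU
  set stL := str.toList.foldl (fun (a : List Bool) c => if pyIslowerA c then a.set (c.toNat - 97) true else a)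
    (List.replicate 26 false) with hstL
  have eU25 : stU.getD 25 false = PySem.Set.contains chars 'Z' := by
    rw [hstU, hchars]; exact flagU str.toList 'Z' (by decide) (by decide)
  have eL25 : stL.getD 25 false = PySem.Set.contains chars 'z' := by
    rw [hstL, hchars]; exact flagL str.toList 'z' (by decide) (by decide)
  have eU24 : stU.getD 24 false = PySem.Set.contains chars 'Y' := by
    rw [hstU, hchars]; exact flagU str.toList 'Y' (by decide) (by decide)
  have eL24 : stL.getD 24 false = PySem.Set.contains chars 'y' := by
    rw [hstL, hchars]; exact flagL str.toList 'y' (by decide) (by decide)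
  have eU23 : stU.getD 23 false = PySem.Set.contains chars 'X' := by
    rw [hstU, hchars]; exact flagU str.toList 'X' (by decide) (by decide)
  have eL23 : stL.getD 23 false = PySem.Set.contains chars 'x' := by
    rw [hstL, hchars]; exact flagL str.toList 'x' (by decide) (by decide)
  have eU22 : stU.getD 22 false = PySem.Set.contains chars 'W' := by
    rw [hstU, hchars]; exact flagU str.toList 'W' (by decide) (by decide)
  have eL22 : stL.getD 22 false = PySem.Set.contains chars 'w' := by
    rw [hstL, hchars]; exact flagL str.toList 'w' (by decide) (by decide)
  have eU21 : stU.getD 21 false = PySem.Set.contains chars 'V' := by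
    rw [hstU, hchars]; exact flagU str.toList 'V' (by decide) (by decide)
  have eL21 : stL.getD 21 false = PySem.Set.contains chars 'v' := by
    rw [hstL, hchars]; exact flagL str.toList 'v' (by decide) (by decide)
  have eU20 : stU.getD 20 false = PySem.Set.contains chars 'U' := by
    rw [hstU, hchars]; exact flagU str.toList 'U' (by decide) (by decide)
  have eL20 : stL.getD 20 false = PySem.Set.contains chars 'u' := by
    rw [hstL, hchars]; exact flagL str.toList 'u' (by decide) (by decide)
  have eU19 : stU.getD 19 false = PySem.Set.contains chars 'T' := by
    rw [hstU, hchars]; exact flagU str.toList 'T' (by decide) (by decide)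
  have eL19 : stL.getD 19 false = PySem.Set.contains chars 't' := by
    rw [hstL, hchars]; exact flagL str.toList 't' (by decide) (by decide)
  have eU18 : stU.getD 18 false = PySem.Set.contains chars 'S' := by
    rw [hstU, hchars]; exact flagU str.toList 'S' (by decide) (by decide)
  have eL18 : stL.getD 18 false = PySem.Set.contains chars 's' := by
    rw [hstL, hchars]; exact flagL str.toList 's' (by decide) (by decide)
  have eU17 : stU.getD 17 false = PySem.Set.contains chars 'R' := by
    rw [hstU, hchars]; exact flagU str.toList 'R' (by decide) (by decide)
  have eL17 : stL.getD 17 false = PySem.Set.contains chars 'r' := by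
    rw [hstL, hchars]; exact flagL str.toList 'r' (by decide) (by decide)
  have eU16 : stU.getD 16 false = PySem.Set.contains chars 'Q' := by
    rw [hstU, hchars]; exact flagU str.toList 'Q' (by decide) (by decide)
  have eL16 : stL.getD 16 false = PySem.Set.contains chars 'q' := by
    rw [hstL, hchars]; exact flagL str.toList 'q' (by decide) (by decide)
  have eU15 : stU.getD 15 false = PySem.Set.contains chars 'P' := by
    rw [hstU, hchars]; exact flagU str.toList 'P' (by decide) (by decide)
  have eL15 : stL.getD 15 false = PySem.Set.contains chars 'p' := by
    rw [hstL, hchars]; exact flagL str.toList 'p' (by decide) (by decide)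
  have eU14 : stU.getD 14 false = PySem.Set.contains chars 'O' := by
    rw [hstU, hchars]; exact flagU str.toList 'O' (by decide) (by decide)
  have eL14 : stL.getD 14 false = PySem.Set.contains chars 'o' := by
    rw [hstL, hchars]; exact flagL str.toList 'o' (by decide) (by decide)
  have eU13 : stU.getD 13 false = PySem.Set.contains chars 'N' := by
    rw [hstU, hchars]; exact flagU str.toList 'N' (by decide) (by decide)
  have eL13 : stL.getD 13 false = PySem.Set.contains chars 'n' := by
    rw [hstL, hchars]; exact flagL str.toList 'n' (by decide) (by decide)
  have eU12 : stU.getD 12 false = PySem.Set.contains chars 'M' := by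
    rw [hstU, hchars]; exact flagU str.toList 'M' (by decide) (by decide)
  have eL12 : stL.getD 12 false = PySem.Set.contains chars 'm' := by
    rw [hstL, hchars]; exact flagL str.toList 'm' (by decide) (by decide)
  have eU11 : stU.getD 11 false = PySem.Set.contains chars 'L' := by
    rw [hstU, hchars]; exact flagU str.toList 'L' (by decide) (by decide)
  have eL11 : stL.getD 11 false = PySem.Set.contains chars 'l' := by
    rw [hstL, hchars]; exact flagL str.toList 'l' (by decide) (by decide)
  have eU10 : stU.getD 10 false = PySem.Set.contains chars 'K' := by
    rw [hstU, hchars]; exact flagU str.toList 'K' (by decide) (by decide)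
  have eL10 : stL.getD 10 false = PySem.Set.contains chars 'k' := by
    rw [hstL, hchars]; exact flagL str.toList 'k' (by decide) (by decide)
  have eU9 : stU.getD 9 false = PySem.Set.contains chars 'J' := by
    rw [hstU, hchars]; exact flagU str.toList 'J' (by decide) (by decide)
  have eL9 : stL.getD 9 false = PySem.Set.contains chars 'j' := by
    rw [hstL, hchars]; exact flagL str.toList 'j' (by decide) (by decide)
  have eU8 : stU.getD 8 false = PySem.Set.contains chars 'I' := by
    rw [hstU, hchars]; exact flagU str.toList 'I' (by decide) (by decide)
  have eL8 : stL.getD 8 false = PySem.Set.contains chars 'i' := by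
    rw [hstL, hchars]; exact flagL str.toList 'i' (by decide) (by decide)
  have eU7 : stU.getD 7 false = PySem.Set.contains chars 'H' := by
    rw [hstU, hchars]; exact flagU str.toList 'H' (by decide) (by decide)
  have eL7 : stL.getD 7 false = PySem.Set.contains chars 'h' := by
    rw [hstL, hchars]; exact flagL str.toList 'h' (by decide) (by decide)
  have eU6 : stU.getD 6 false = PySem.Set.contains chars 'G' := by
    rw [hstU, hchars]; exact flagU str.toList 'G' (by decide) (by decide)
  have eL6 : stL.getD 6 false = PySem.Set.contains chars 'g' := by
    rw [hstL, hchars]; exact flagL str.toList 'g' (by decide) (by decide)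
  have eU5 : stU.getD 5 false = PySem.Set.contains chars 'F' := by
    rw [hstU, hchars]; exact flagU str.toList 'F' (by decide) (by decide)
  have eL5 : stL.getD 5 false = PySem.Set.contains chars 'f' := by
    rw [hstL, hchars]; exact flagL str.toList 'f' (by decide) (by decide)
  have eU4 : stU.getD 4 false = PySem.Set.contains chars 'E' := by
    rw [hstU, hchars]; exact flagU str.toList 'E' (by decide) (by decide)
  have eL4 : stL.getD 4 false = PySem.Set.contains chars 'e' := by
    rw [hstL, hchars]; exact flagL str.toList 'e' (by decide) (by decide)
  have eU3 : stU.getD 3 false = PySem.Set.contains chars 'D' := by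
    rw [hstU, hchars]; exact flagU str.toList 'D' (by decide) (by decide)
  have eL3 : stL.getD 3 false = PySem.Set.contains chars 'd' := by
    rw [hstL, hchars]; exact flagL str.toList 'd' (by decide) (by decide)
  have eU2 : stU.getD 2 false = PySem.Set.contains chars 'C' := by
    rw [hstU, hchars]; exact flagU str.toList 'C' (by decide) (by decide)
  have eL2 : stL.getD 2 false = PySem.Set.contains chars 'c' := by
    rw [hstL, hchars]; exact flagL str.toList 'c' (by decide) (by decide)
  have eU1 : stU.getD 1 false = PySem.Set.contains chars 'B' := by
    rw [hstU, hchars]; exact flagU str.toList 'B' (by decide) (by decide)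
  have eL1 : stL.getD 1 false = PySem.Set.contains chars 'b' := by
    rw [hstL, hchars]; exact flagL str.toList 'b' (by decide) (by decide)
  have eU0 : stU.getD 0 false = PySem.Set.contains chars 'A' := by
    rw [hstU, hchars]; exact flagU str.toList 'A' (by decide) (by decide)
  have eL0 : stL.getD 0 false = PySem.Set.contains chars 'a' := by
    rw [hstL, hchars]; exact flagL str.toList 'a' (by decide) (by decide)
  have cA25 : Char.ofNat (25 + 65) = 'Z' := by decide
  have cB25 : Char.ofNat ('Z'.toNat + 32) = 'z' := by decide
  have cA24 : Char.ofNat (24 + 65) = 'Y' := by decide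
  have cB24 : Char.ofNat ('Y'.toNat + 32) = 'y' := by decide
  have cA23 : Char.ofNat (23 + 65) = 'X' := by decide
  have cB23 : Char.ofNat ('X'.toNat + 32) = 'x' := by decide
  have cA22 : Char.ofNat (22 + 65) = 'W' := by decide
  have cB22 : Char.ofNat ('W'.toNat + 32) = 'w' := by decide
  have cA21 : Char.ofNat (21 + 65) = 'V' := by decide
  have cB21 : Char.ofNat ('V'.toNat + 32) = 'v' := by decide
  have cA20 : Char.ofNat (20 + 65) = 'U' := by decide
  have cB20 : Char.ofNat ('U'.toNat + 32) = 'u' := by decide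
  have cA19 : Char.ofNat (19 + 65) = 'T' := by decide
  have cB19 : Char.ofNat ('T'.toNat + 32) = 't' := by decide
  have cA18 : Char.ofNat (18 + 65) = 'S' := by decide
  have cB18 : Char.ofNat ('S'.toNat + 32) = 's' := by decide
  have cA17 : Char.ofNat (17 + 65) = 'R' := by decide
  have cB17 : Char.ofNat ('R'.toNat + 32) = 'r' := by decide
  have cA16 : Char.ofNat (16 + 65) = 'Q' := by decide
  have cB16 : Char.ofNat ('Q'.toNat + 32) = 'q' := by decide
  have cA15 : Char.ofNat (15 + 65) = 'P' := by decide
  have cB15 : Char.ofNat ('P'.toNat + 32) = 'p' := by decide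
  have cA14 : Char.ofNat (14 + 65) = 'O' := by decide
  have cB14 : Char.ofNat ('O'.toNat + 32) = 'o' := by decide
  have cA13 : Char.ofNat (13 + 65) = 'N' := by decide
  have cB13 : Char.ofNat ('N'.toNat + 32) = 'n' := by decide
  have cA12 : Char.ofNat (12 + 65) = 'M' := by decide
  have cB12 : Char.ofNat ('M'.toNat + 32) = 'm' := by decide
  have cA11 : Char.ofNat (11 + 65) = 'L' := by decide
  have cB11 : Char.ofNat ('L'.toNat + 32) = 'l' := by decide
  have cA10 : Char.ofNat (10 + 65) = 'K' := by decide
  have cB10 : Char.ofNat ('K'.toNat + 32) = 'k' := by decide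
  have cA9 : Char.ofNat (9 + 65) = 'J' := by decide
  have cB9 : Char.ofNat ('J'.toNat + 32) = 'j' := by decide
  have cA8 : Char.ofNat (8 + 65) = 'I' := by decide
  have cB8 : Char.ofNat ('I'.toNat + 32) = 'i' := by decide
  have cA7 : Char.ofNat (7 + 65) = 'H' := by decide
  have cB7 : Char.ofNat ('H'.toNat + 32) = 'h' := by decide
  have cA6 : Char.ofNat (6 + 65) = 'G' := by decide
  have cB6 : Char.ofNat ('G'.toNat + 32) = 'g' := by decide
  have cA5 : Char.ofNat (5 + 65) = 'F' := by decide
  have cB5 : Char.ofNat ('F'.toNat + 32) = 'f' := by decide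
  have cA4 : Char.ofNat (4 + 65) = 'E' := by decide
  have cB4 : Char.ofNat ('E'.toNat + 32) = 'e' := by decide
  have cA3 : Char.ofNat (3 + 65) = 'D' := by decide
  have cB3 : Char.ofNat ('D'.toNat + 32) = 'd' := by decide
  have cA2 : Char.ofNat (2 + 65) = 'C' := by decide
  have cB2 : Char.ofNat ('C'.toNat + 32) = 'c' := by decide
  have cA1 : Char.ofNat (1 + 65) = 'B' := by decide
  have cB1 : Char.ofNat ('B'.toNat + 32) = 'b' := by decide
  have cA0 : Char.ofNat (0 + 65) = 'A' := by decide
  have cB0 : Char.ofNat ('A'.toNat + 32) = 'a' := by decide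
  have hrange : PySem.List.pyRange 25 (-1) (-1)
      = [25, 24, 23, 22, 21, 20, 19, 18, 17, 16, 15, 14, 13, 12, 11, 10, 9, 8, 7, 6, 5, 4, 3, 2, 1, 0] := by decide
  rw [hrange]
  simp only [scanA, scanMem, lettersZA]
  simp only [(show ((0:Int).toNat = 0) from rfl), (show ((1:Int).toNat = 1) from rfl), (show ((2:Int).toNat = 2) from rfl), (show ((3:Int).toNat = 3) from rfl), (show ((4:Int).toNat = 4) from rfl), (show ((5:Int).toNat = 5) from rfl), (show ((6:Int).toNat = 6) from rfl), (show ((7:Int).toNat = 7) from rfl), (show ((8:Int).toNat = 8) from rfl), (show ((9:Int).toNat = 9) from rfl), (show ((10:Int).toNat = 10) from rfl), (show ((11:Int).toNat = 11) from rfl), (show ((12:Int).toNat = 12) from rfl), (show ((13:Int).toNat = 13) from rfl), (show ((14:Int).toNat = 14) from rfl), (show ((15:Int).toNat = 15) from rfl), (show ((16:Int).toNat = 16) from rfl), (show ((17:Int).toNat = 17) from rfl), (show ((18:Int).toNat = 18) from rfl), (show ((19:Int).toNat = 19) from rfl), (show ((20:Int).toNat = 20) from rfl), (show ((21:Int).toNat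 = 21) from rfl), (show ((22:Int).toNat = 22) from rfl), (show ((23:Int).toNat = 23) from rfl), (show ((24:Int).toNat = 24) from rfl), (show ((25:Int).toNat = 25) from rfl)]
  simp only [eU25, eL25, eU24, eL24, eU23, eL23, eU22, eL22, eU21, eL21, eU20, eL20, eU19, eL19, eU18, eL18, eU17, eL17, eU16, eL16, eU15, eL15, eU14, eL14, eU13, eL13, eU12, eL12, eU11, eL11, eU10, eL10, eU9, eL9, eU8, eL8, eU7, eL7, eU6, eL6, eU5, eL5, eU4, eL4, eU3, eL3, eU2, eL2, eU1, eL1, eU0, eL0]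
  simp only [cA25, cB25, cA24, cB24, cA23, cB23, cA22, cB22, cA21, cB21, cA20, cB20, cA19, cB19, cA18, cB18, cA17, cB17, cA16, cB16, cA15, cB15, cA14, cB14, cA13, cB13, cA12, cB12, cA11, cB11, cA10, cB10, cA9, cB9, cA8, cB8, cA7, cB7, cA6, cB6, cA5, cB5, cA4, cB4, cA3, cB3, cA2, cB2, cA1, cB1, cA0, cB0]

-- ===== B side =====

def isUZ (u : Char) : Prop := 65 ≤ u.toNat ∧ u.toNat ≤ 90

def hasPair (l : List Char) (u : Char) : Prop := u ∈ l ∧ Char.ofNat (u.toNat + 32) ∈ l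

def BestInv (l : List Char) : Option Char → Prop
  | none => ∀ u, isUZ u → ¬ hasPair l u
  | some u => isUZ u ∧ hasPair l u ∧ ∀ v, isUZ v → hasPair l v → v.toNat ≤ u.toNat

-- the running maximum absorbs a newly completed pair u0
theorem best_step (l : List Char) (c u0 : Char) (b : Option Char)
    (hu0Z : isUZ u0) (hpair : hasPair (l ++ [c]) u0)
    (hiff : ∀ v, isUZ v → (hasPair (l ++ [c]) v ↔ hasPair l v ∨ v = u0))
    (hB : BestInv l b) :
    BestInv (l ++ [c]) (if b.elim true (fun w => w.toNat < u0.toNat) then some u0 else b) := by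
  cases b with
  | none =>
    simp only [Option.elim_none, if_true]
    refine ⟨hu0Z, hpair, ?_⟩
    intro v hv hpv
    rcases (hiff v hv).mp hpv with h | rfl
    · exact absurd h (hB v hv)
    · exact le_refl _
  | some w =>
    obtain ⟨hwZ, hwp, hwmax⟩ := hB
    obtain ⟨hw1, hw2⟩ := hwp
    simp only [Option.elim_some]
    by_cases h : w.toNat < u0.toNat
    · rw [if_pos (decide_eq_true h)]
      refine ⟨hu0Z, hpair, ?_⟩
      intro v hv hpv
      rcases (hiff v hv).mp hpv with hlv | rfl
      · have := hwmax v hv hlv; omega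
      · exact le_refl _
    · rw [if_neg (by simpa using h)]
      refine ⟨hwZ, ⟨List.mem_append_left _ hw1, List.mem_append_left _ hw2⟩, ?_⟩
      intro v hv hpv
      rcases (hiff v hv).mp hpv with hlv | rfl
      · exact hwmax v hv hlv
      · omega

-- no new pair: the running maximum is unchanged
theorem best_keep (l : List Char) (c : Char) (b : Option Char)
    (hiff : ∀ v, isUZ v → (hasPair (l ++ [c]) v ↔ hasPair l v))
    (hB : BestInv l b) : BestInv (l ++ [c]) b := by
  cases b with
  | none =>
    intro v hv hpv
    exact hB v hv ((hiff v hv).mp hpv)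
  | some w =>
    obtain ⟨hwZ, ⟨hw1, hw2⟩, hwmax⟩ := hB
    refine ⟨hwZ, ⟨List.mem_append_left _ hw1, List.mem_append_left _ hw2⟩, ?_⟩
    intro v hv hpv
    exact hwmax v hv ((hiff v hv).mp hpv)

theorem invB (l : List Char) :
    (∀ x, PySem.Set.contains (l.foldl stepB (none, PySem.Set.empty)).2 x = true ↔ x ∈ l)
    ∧ BestInv l (l.foldl stepB (none, PySem.Set.empty)).1 := by
  induction l using List.reverseRecOn with
  | nil =>
    refine ⟨?_, ?_⟩
    · intro x
      simp [PySem.Set.empty]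
    · intro u _ hp
      exact absurd hp.1 (List.not_mem_nil)
  | append_singleton l c ih =>
    obtain ⟨hS, hB⟩ := ih
    have hfold : List.foldl stepB (none, PySem.Set.empty) (l ++ [c])
        = stepB (List.foldl stepB (none, PySem.Set.empty) l) c := by
      rw [List.foldl_append]; rfl
    rw [hfold]
    set st := List.foldl stepB (none, PySem.Set.empty) l with hst
    have h2 : (stepB st c).2 = PySem.Set.add st.2 c := by
      unfold stepB; split_ifs <;> rfl
    have hmem : ∀ x : Char, x ∈ st.2 ↔ x ∈ l := by
      intro x
      rw [← hS x, PySem.Set.contains_iff]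
    refine ⟨?_, ?_⟩
    · intro x
      rw [h2, PySem.Set.contains_iff, PySem.Set.mem_add, hmem x, List.mem_append,
        List.mem_singleton]
    · by_cases hc1 : (pyIslowerA c && PySem.Set.contains st.2 (Char.ofNat (c.toNat - 32))) = true
      · -- c is a lowercase letter completing (or re-completing) the pair of u0 := upper(c)
        have hb1 : (stepB st c).1
            = (if st.1.elim true (fun b => b.toNat < (Char.ofNat (c.toNat - 32)).toNat)
                then some (Char.ofNat (c.toNat - 32)) else st.1) := by
          unfold stepB; rw [if_pos hc1]
        rw [hb1]
        simp only [pyIslowerA, Bool.and_eq_true, decide_eq_true_eq] at hc1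
        obtain ⟨⟨hcl, hcu⟩, hcin⟩ := hc1
        have hu0mem : Char.ofNat (c.toNat - 32) ∈ l := (hmem _).mp ((PySem.Set.contains_iff _ _).mp hcin)
        have hu0 : (Char.ofNat (c.toNat - 32)).toNat = c.toNat - 32 :=
          toNat_ofNat_small _ (by omega)
        have hu0Z : isUZ (Char.ofNat (c.toNat - 32)) := by
          constructor <;> omega
        have hlowu0 : Char.ofNat ((Char.ofNat (c.toNat - 32)).toNat + 32) = c := by
          rw [hu0, show c.toNat - 32 + 32 = c.toNat by omega, Char.ofNat_toNat]
        refine best_step l c _ st.1 hu0Z ⟨List.mem_append_left _ hu0mem, ?_⟩ ?_ hB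
        · rw [hlowu0]; exact List.mem_append_right _ (List.mem_singleton_self c)
        · intro v hv
          obtain ⟨hv1, hv2⟩ := hv
          have hlv : (Char.ofNat (v.toNat + 32)).toNat = v.toNat + 32 :=
            toNat_ofNat_small _ (by omega)
          constructor
          · rintro ⟨ha, hb'⟩
            have hvl : v ∈ l := by
              rcases List.mem_append.mp ha with h | h
              · exact h
              · have := List.mem_singleton.mp h
                subst this; omega
            rcases List.mem_append.mp hb' with h | h
            · exact Or.inl ⟨hvl, h⟩
            · right
              have hvc := List.mem_singleton.mp h
              apply char_eq_of_toNat_eq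
              rw [hu0]
              have : (Char.ofNat (v.toNat + 32)).toNat = c.toNat := by rw [hvc]
              omega
          · rintro (⟨ha, hb'⟩ | rfl)
            · exact ⟨List.mem_append_left _ ha, List.mem_append_left _ hb'⟩
            · exact ⟨List.mem_append_left _ hu0mem,
                by rw [hlowu0]; exact List.mem_append_right _ (List.mem_singleton_self c)⟩
      · by_cases hc2 : (pyIsupperA c && PySem.Set.contains st.2 (Char.ofNat (c.toNat + 32))) = true
        · -- c is an uppercase letter whose lowercase was already seen
          have hb2 : (stepB st c).1
              = (if st.1.elim true (fun b => b.toNat < c.toNat) then some c else st.1) := by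
            unfold stepB; rw [if_neg (by simpa using hc1), if_pos hc2]
          rw [hb2]
          simp only [pyIsupperA, Bool.and_eq_true, decide_eq_true_eq] at hc2
          obtain ⟨⟨hcl, hcu⟩, hcin⟩ := hc2
          have hlcmem : Char.ofNat (c.toNat + 32) ∈ l := (hmem _).mp ((PySem.Set.contains_iff _ _).mp hcin)
          have hcZ : isUZ c := ⟨hcl, hcu⟩
          refine best_step l c c st.1 hcZ
            ⟨List.mem_append_right _ (List.mem_singleton_self c), List.mem_append_left _ hlcmem⟩
            ?_ hB
          intro v hv
          obtain ⟨hv1, hv2⟩ := hv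
          have hlv : (Char.ofNat (v.toNat + 32)).toNat = v.toNat + 32 :=
            toNat_ofNat_small _ (by omega)
          constructor
          · rintro ⟨ha, hb'⟩
            have hlvl : Char.ofNat (v.toNat + 32) ∈ l := by
              rcases List.mem_append.mp hb' with h | h
              · exact h
              · have := List.mem_singleton.mp h
                have : (Char.ofNat (v.toNat + 32)).toNat = c.toNat := by rw [this]
                omega
            rcases List.mem_append.mp ha with h | h
            · exact Or.inl ⟨h, hlvl⟩
            · exact Or.inr (List.mem_singleton.mp h)
          · rintro (⟨ha, hb'⟩ | rfl)
            · exact ⟨List.mem_append_left _ ha, List.mem_append_left _ hb'⟩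
            · exact ⟨List.mem_append_right _ (List.mem_singleton_self _),
                List.mem_append_left _ hlcmem⟩
        · -- c completes no new pair
          have hb3 : (stepB st c).1 = st.1 := by
            unfold stepB; rw [if_neg (by simpa using hc1), if_neg (by simpa using hc2)]
          rw [hb3]
          refine best_keep l c st.1 ?_ hB
          intro v hv
          obtain ⟨hv1, hv2⟩ := hv
          have hlv : (Char.ofNat (v.toNat + 32)).toNat = v.toNat + 32 :=
            toNat_ofNat_small _ (by omega)
          constructor
          · rintro ⟨ha, hb'⟩
            have hvl : v ∈ l := by
              rcases List.mem_append.mp ha with h | h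
              · exact h
              · -- v = c : then c is an upper letter and its lowercase is in l ++ [c]
                have hvc := List.mem_singleton.mp h
                subst hvc
                exfalso
                have hlow_ne : Char.ofNat (v.toNat + 32) ≠ v := by
                  intro he
                  have := congrArg Char.toNat he
                  omega
                have hlowl : Char.ofNat (v.toNat + 32) ∈ l := by
                  rcases List.mem_append.mp hb' with h' | h'
                  · exact h'
                  · exact absurd (List.mem_singleton.mp h') hlow_ne
                apply hc2
                simp only [pyIsupperA, Bool.and_eq_true, decide_eq_true_eq]
                exact ⟨⟨by omega, by omega⟩,
                  (PySem.Set.contains_iff _ _).mpr ((hmem _).mpr hlowl)⟩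
            have hlvl : Char.ofNat (v.toNat + 32) ∈ l := by
              rcases List.mem_append.mp hb' with h | h
              · exact h
              · -- lower(v) = c : then c is a lowercase letter with upper(c) = v ∈ l
                exfalso
                have hvc := List.mem_singleton.mp h
                have hcv : c.toNat = v.toNat + 32 := by rw [← hvc, hlv]
                apply hc1
                simp only [pyIslowerA, Bool.and_eq_true, decide_eq_true_eq]
                refine ⟨⟨by omega, by omega⟩, (PySem.Set.contains_iff _ _).mpr ((hmem _).mpr ?_)⟩
                have : Char.ofNat (c.toNat - 32) = v := by
                  apply char_eq_of_toNat_eq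
                  rw [toNat_ofNat_small _ (by omega)]
                  omega
                rw [this]; exact hvl
            exact ⟨hvl, hlvl⟩
          · rintro ⟨ha, hb'⟩
            exact ⟨List.mem_append_left _ ha, List.mem_append_left _ hb'⟩

theorem scanMem_no (S : PySem.Set Char) (L : List Char)
    (h : ∀ v ∈ L, (PySem.Set.contains S v && PySem.Set.contains S (Char.ofNat (v.toNat + 32))) = false) :
    scanMem S L = "NO" := by
  induction L with
  | nil => rfl
  | cons a L ih =>
    simp only [scanMem, h a (by simp)]
    exact ih (fun v hv => h v (by simp [hv]))

theorem scanMem_ret (S : PySem.Set Char) (u : Char) (L : List Char)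
    (hsort : L.Pairwise (fun a b => b.toNat < a.toNat)) (hu : u ∈ L)
    (htest : (PySem.Set.contains S u && PySem.Set.contains S (Char.ofNat (u.toNat + 32))) = true)
    (hmax : ∀ v ∈ L, (PySem.Set.contains S v && PySem.Set.contains S (Char.ofNat (v.toNat + 32))) = true → v.toNat ≤ u.toNat) :
    scanMem S L = String.ofList [u] := by
  induction L with
  | nil => cases hu
  | cons a L ih =>
    rcases List.mem_cons.mp hu with rfl | huL
    · simp only [scanMem, htest, if_true]
    · have halt : a.toNat > u.toNat := (List.pairwise_cons.mp hsort).1 u huL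
      have hta : (PySem.Set.contains S a && PySem.Set.contains S (Char.ofNat (a.toNat + 32))) = false := by
        by_contra h
        have := hmax a (by simp) (by simpa using h)
        omega
      simp only [scanMem, hta, Bool.false_eq_true, if_false]
      exact ih (List.pairwise_cons.mp hsort).2 huL
        (fun v hv ht => hmax v (by simp [hv]) ht)

theorem mem_lettersZA (n : Nat) (h1 : 65 ≤ n) (h2 : n ≤ 90) : Char.ofNat n ∈ lettersZA := by
  interval_cases n <;> decide

theorem lettersZA_sorted : lettersZA.Pairwise (fun a b => b.toNat < a.toNat) := by decide

theorem lettersZA_isUZ : ∀ u ∈ lettersZA, isUZ u := by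
  intro u hu; fin_cases hu <;> exact ⟨by decide, by decide⟩

-- ===== VERDICT (by name: the statement is the Claim_ definition above) =====
theorem largestCharacter_spec : Claim_equal_largestCharacter := by
  intro str _
  unfold Spec_largestCharacter
  rw [A_eq_scanMem]
  obtain ⟨hseen, hbest⟩ := invB str.toList
  set chars : PySem.Set Char := PySem.Set.ofList str.toList with hchars
  have hmemS : ∀ x, PySem.Set.contains chars x = true ↔ x ∈ str.toList := by
    intro x; rw [hchars, PySem.Set.contains_iff, PySem.Set.mem_ofList]
  have htest : ∀ v, (PySem.Set.contains chars v && PySem.Set.contains chars (Char.ofNat (v.toNat + 32))) = true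
      ↔ hasPair str.toList v := by
    intro v
    simp only [Bool.and_eq_true, hmemS, hasPair]
  simp only [largestCharacter_alt]
  cases hb : (str.toList.foldl stepB (none, PySem.Set.empty)).1 with
  | none =>
    rw [hb] at hbest
    show scanMem chars lettersZA = "NO"
    refine scanMem_no chars lettersZA (fun v hv => ?_)
    by_contra h
    exact hbest v (lettersZA_isUZ v hv) ((htest v).mp (by simpa using h))
  | some u =>
    rw [hb] at hbest
    obtain ⟨huZ, hup, humax⟩ := hbest
    show scanMem chars lettersZA = String.ofList [u]
    refine scanMem_ret chars u lettersZA lettersZA_sorted ?_ ((htest u).mpr hup) ?_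
    · have := mem_lettersZA u.toNat huZ.1 huZ.2
      rwa [Char.ofNat_toNat] at this
    · intro v hv ht
      exact humax v (lettersZA_isUZ v hv) ((htest v).mp ht)
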